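-- pv_equiv track=rewrite | github.com/prototact/advent-of-code-solutions | 2019/day8/main.py | parse_image
-- ===== SOURCE A (Python) =====
-- def parse_image(image: str, dims: tuple[int, int]) -> list[list[list[int]]]:
--     layers: list[list[list[int]]] = []
--     layer: list[list[int]] = []
--     row: list[int] = []
--     width, height = dims
--     for digit in image:
--         row.append(int(digit))
--         if len(row) == width:
--             layer.append(row)
--             row = []
--         if len(layer) == height:
--             layers.append(layer)
--             layer = []
--     return layers
-- ===== SOURCE B (Python) =====
-- def parse_image(image: str, dims: tuple[int, int]) -> list[list[list[int]]]:
--     width, height = dims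
--     digits = [int(c) for c in image]
--     layer_size = width * height
--     layers: list[list[list[int]]] = []
--     for i in range(0, len(digits) - layer_size + 1, layer_size):
--         chunk = digits[i:i + layer_size]
--         layers.append([chunk[j:j + width] for j in range(0, layer_size, width)])
--     return layers
-- ===== Notes on version B (the rewrite author's own statement) =====
-- stated objective: idiomatic
-- what changed: Replaces A's character-by-character fold through row/layer/layers accumulators with flush conditions by a one-shot digit-list conversion followed by arithmetic chunking into layer and row slices.
-- outside the precondition, e.g. on parse_image('123', (2, 0)): A returns [[]], B raises ValueError; on parse_image('12345678', (-2, -2)): A returns [], B returns [[], []]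
import Mathlib
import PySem

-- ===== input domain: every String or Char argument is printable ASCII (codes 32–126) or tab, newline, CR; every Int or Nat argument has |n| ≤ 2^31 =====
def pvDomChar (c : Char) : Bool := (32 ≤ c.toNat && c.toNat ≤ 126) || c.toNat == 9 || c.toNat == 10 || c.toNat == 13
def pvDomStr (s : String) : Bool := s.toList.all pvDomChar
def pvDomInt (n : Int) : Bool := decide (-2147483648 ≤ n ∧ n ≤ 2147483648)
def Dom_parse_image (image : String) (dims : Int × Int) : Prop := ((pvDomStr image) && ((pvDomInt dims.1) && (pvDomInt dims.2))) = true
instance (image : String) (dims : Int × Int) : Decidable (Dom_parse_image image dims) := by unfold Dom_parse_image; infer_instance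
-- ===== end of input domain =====

-- B replaces A's char-by-char fold through row/layer accumulators by arithmetic chunking
-- (one digit-list conversion, then layer and row slices); objective: idiomatic, not faster.

-- int(c) for a single character c (Python raises ValueError on a non-digit; such inputs
-- are outside Pre_parse_image, so this helper's default value is never reached there)
def pvInt (c : Char) : Int := (PySem.Int.ofStr? (String.ofList [c])).getD 0

-- ===== PORT A =====
def parse_image (image : String) (dims : Int × Int) : List (List (List Int)) :=
  let width := dims.1
  let height := dims.2
  let st := image.toList.foldl
    (fun (st : List (List (List Int)) × List (List Int) × List Int) c =>
      let layers := st.1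
      let layer := st.2.1
      let row := st.2.2 ++ [pvInt c]
      let p1 := if (row.length : Int) = width then (layer ++ [row], ([] : List Int)) else (layer, row)
      if (p1.1.length : Int) = height then (layers ++ [p1.1], [], p1.2) else (layers, p1.1, p1.2))
    ([], [], [])
  st.1

-- ===== PORT B =====
def parse_image_alt (image : String) (dims : Int × Int) : List (List (List Int)) :=
  let width := dims.1
  let height := dims.2
  let digits := image.toList.map pvInt
  let layer_size := width * height
  (PySem.List.pyRange 0 ((digits.length : Int) - layer_size + 1) layer_size).foldl
    (fun layers i =>
      let chunk := PySem.List.slice digits (some i) (some (i + layer_size))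
      layers ++ [(PySem.List.pyRange 0 layer_size width).map
        (fun j => PySem.List.slice chunk (some j) (some (j + width)))])
    []

-- ===== PRECONDITION & SPEC =====
-- Pre_ excludes (a) strings with a non-digit character, on which A raises ValueError,
-- (b) a zero width or height, where B's range step is zero (ValueError) while A returns
-- accidental loop-state values such as parse_image "123" (2,0) = [[]], and (c) both
-- dimensions negative, where both return accidental values that differ (A [] vs B a list
-- of empty layers).
def Pre_parse_image (image : String) (dims : Int × Int) : Prop :=
  dims.1 ≠ 0 ∧ dims.2 ≠ 0 ∧ (0 < dims.1 ∨ 0 < dims.2) ∧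
    image.toList.all (fun c => 48 ≤ c.toNat && c.toNat ≤ 57) = true  -- every character is a digit '0'–'9'
instance (image : String) (dims : Int × Int) : Decidable (Pre_parse_image image dims) := by
  unfold Pre_parse_image; infer_instance

def pvWitness_parse_image : String × (Int × Int) := ("123456", (3, 2))

def Spec_parse_image (image : String) (dims : Int × Int) (out : List (List (List Int))) : Prop := out = parse_image_alt image dims
instance (image : String) (dims : Int × Int) (out : List (List (List Int))) : Decidable (Spec_parse_image image dims out) := by unfold Spec_parse_image; infer_instance

-- ===== CLAIM (what is proved, stated in full; the proofs are below) =====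
def Claim_equal_parse_image : Prop := ∀ (image : String) (dims : Int × Int), Dom_parse_image image dims → Pre_parse_image image dims → Spec_parse_image image dims (parse_image image dims)

-- ===== LEMMAS AND PROOFS =====

-- A's loop body, with the digit value already extracted
def stepA (w h : Int) (st : List (List (List Int)) × List (List Int) × List Int) (d : Int) :
    List (List (List Int)) × List (List Int) × List Int :=
  let layers := st.1
  let layer := st.2.1
  let row := st.2.2 ++ [d]
  let p1 := if (row.length : Int) = w then (layer ++ [row], ([] : List Int)) else (layer, row)
  if (p1.1.length : Int) = h then (layers ++ [p1.1], [], p1.2) else (layers, p1.1, p1.2)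

lemma parse_image_eq_foldl (image : String) (dims : Int × Int) :
    parse_image image dims =
      ((image.toList.map pvInt).foldl (stepA dims.1 dims.2) ([], [], [])).1 := by
  simp [parse_image, stepA, List.foldl_map]

def chunks (W : Nat) (ds : List Int) : List (List Int) :=
  if h : 0 < W ∧ W ≤ ds.length then
    ds.take W :: chunks W (ds.drop W)
  else []
termination_by ds.length
decreasing_by simp; omega

lemma chunks_nil {W : Nat} {ds : List Int} (h : ds.length < W) : chunks W ds = [] := by
  rw [chunks]; rw [dif_neg]; omega

lemma chunks_cons {W : Nat} {ds : List Int} (h0 : 0 < W) (h : W ≤ ds.length) :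
    chunks W ds = ds.take W :: chunks W (ds.drop W) := by
  rw [chunks]; rw [dif_pos ⟨h0, h⟩]

lemma drop_len {W m : Nat} {ds : List Int} (hd : ds.length = W * (m+1)) :
    (ds.drop W).length = W * m := by
  rw [List.length_drop, hd, Nat.mul_succ, Nat.add_sub_cancel]

lemma le_len {W m : Nat} {ds : List Int} (hd : ds.length = W * (m+1)) : W ≤ ds.length := by
  rw [hd, Nat.mul_succ]; exact Nat.le_add_left W (W*m)

lemma flatten_chunks {W : Nat} (h0 : 0 < W) :
    ∀ (m : Nat) (ds : List Int), ds.length = W * m → (chunks W ds).flatten = ds := by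
  intro m
  induction m with
  | zero =>
    intro ds hd
    have h1 : ds.length = 0 := by simpa using hd
    simp [chunks_nil (by omega : ds.length < W)]
    exact List.eq_nil_of_length_eq_zero h1
  | succ m ih =>
    intro ds hd
    rw [chunks_cons h0 (le_len hd), List.flatten_cons, ih (ds.drop W) (drop_len hd)]
    exact List.take_append_drop W ds

lemma length_chunks {W : Nat} (h0 : 0 < W) :
    ∀ (m : Nat) (ds : List Int), ds.length = W * m → (chunks W ds).length = m := by
  intro m
  induction m with
  | zero =>
    intro ds hd
    have h1 : ds.length = 0 := by simpa using hd
    simp [chunks_nil (by omega : ds.length < W)]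
  | succ m ih =>
    intro ds hd
    rw [chunks_cons h0 (le_len hd)]
    simp [ih (ds.drop W) (drop_len hd)]

lemma mem_chunks_length {W : Nat} (h0 : 0 < W) :
    ∀ (m : Nat) (ds : List Int), ds.length = W * m → ∀ r ∈ chunks W ds, r.length = W := by
  intro m
  induction m with
  | zero =>
    intro ds hd
    have h1 : ds.length = 0 := by simpa using hd
    simp [chunks_nil (by omega : ds.length < W)]
  | succ m ih =>
    intro ds hd r hr
    rw [chunks_cons h0 (le_len hd)] at hr
    rcases List.mem_cons.mp hr with hr | hr
    · subst hr; simp; have := le_len hd; omega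
    · exact ih (ds.drop W) (drop_len hd) r hr

lemma chunks_eq_map_range {W : Nat} (h0 : 0 < W) : ∀ (ds : List Int),
    chunks W ds = (List.range (ds.length / W)).map (fun k => (ds.drop (k * W)).take W) := by
  intro ds
  induction hn : ds.length using Nat.strong_induction_on generalizing ds with
  | _ n ih =>
  by_cases h : W ≤ ds.length
  · rw [chunks_cons h0 h]
    have hlen : (ds.drop W).length = ds.length - W := by simp
    have hdiv : ds.length / W = (ds.drop W).length / W + 1 := by
      rw [hlen, Nat.div_eq_sub_div (by omega) h]
    subst hn
    rw [ih (ds.drop W).length (by omega) (ds.drop W) rfl, hdiv, List.range_succ_eq_map]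
    simp only [List.map_cons, List.map_map]
    congr 1
    · simp
    · apply List.map_congr_left
      intro k _
      simp [Function.comp, List.drop_drop, Nat.succ_mul, Nat.add_comm]
  · subst hn
    rw [chunks_nil (by omega)]
    have h2 : ds.length / W = 0 := Nat.div_eq_of_lt (by omega)
    simp [h2]
lemma step_mid {w h : Int} {L : List (List (List Int))} {P : List (List Int)} {R : List Int}
    {d : Int} (hR : (R.length : Int) + 1 ≠ w) (hP : (P.length : Int) ≠ h) :
    stepA w h (L, P, R) d = (L, P, R ++ [d]) := by
  simp only [stepA]
  have h1 : ¬((((R ++ [d]).length : Nat) : Int) = w) := by simp; omega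
  rw [if_neg h1]
  exact if_neg (by simpa using hP)

lemma step_row {w h : Int} {L : List (List (List Int))} {P : List (List Int)} {R : List Int}
    {d : Int} (hR : (R.length : Int) + 1 = w) (hP : (P.length : Int) + 1 ≠ h) :
    stepA w h (L, P, R) d = (L, P ++ [R ++ [d]], []) := by
  simp only [stepA]
  have h1 : ((((R ++ [d]).length : Nat) : Int) = w) := by simp; omega
  rw [if_pos h1]
  exact if_neg (by simp; omega)

lemma step_layer {w h : Int} {L : List (List (List Int))} {P : List (List Int)} {R : List Int}
    {d : Int} (hR : (R.length : Int) + 1 = w) (hP : (P.length : Int) + 1 = h) :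
    stepA w h (L, P, R) d = (L ++ [P ++ [R ++ [d]]], [], []) := by
  simp only [stepA]
  have h1 : ((((R ++ [d]).length : Nat) : Int) = w) := by simp; omega
  rw [if_pos h1]
  exact if_pos (by simp; omega)

lemma consume_row {w h : Int} (hw : 1 ≤ w) (hh : 1 ≤ h) :
    ∀ (t : List Int) (R : List Int) (P : List (List Int)) (L : List (List (List Int)))
      (ds : List Int), t ≠ [] → (R.length : Int) + t.length = w → (P.length : Int) + 1 < h →
      (t ++ ds).foldl (stepA w h) (L, P, R) = ds.foldl (stepA w h) (L, P ++ [R ++ t], []) := by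
  intro t
  induction t with
  | nil => intro _ _ _ _ hne; exact absurd rfl hne
  | cons d t ih =>
    intro R P L ds _ hlen hP
    rcases t with _ | ⟨d', t'⟩
    · simp only [List.cons_append, List.foldl_cons]
      rw [step_row (by simp at hlen ⊢; omega) (by omega)]
      simp
    · have hne' : d' :: t' ≠ [] := by simp
      rw [List.cons_append, List.foldl_cons]
      rw [step_mid (by simp at hlen ⊢; omega) (by omega)]
      rw [ih (R ++ [d]) P L ds hne' (by simp at hlen ⊢; omega) hP]
      simp

lemma consume_row_last {w h : Int} (hw : 1 ≤ w) (hh : 1 ≤ h) :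
    ∀ (t : List Int) (R : List Int) (P : List (List Int)) (L : List (List (List Int)))
      (ds : List Int), t ≠ [] → (R.length : Int) + t.length = w → (P.length : Int) + 1 = h →
      (t ++ ds).foldl (stepA w h) (L, P, R) = ds.foldl (stepA w h) (L ++ [P ++ [R ++ t]], [], []) := by
  intro t
  induction t with
  | nil => intro _ _ _ _ hne; exact absurd rfl hne
  | cons d t ih =>
    intro R P L ds _ hlen hP
    rcases t with _ | ⟨d', t'⟩
    · simp only [List.cons_append, List.foldl_cons]
      rw [step_layer (by simp at hlen ⊢; omega) (by omega)]
      simp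
    · have hne' : d' :: t' ≠ [] := by simp
      rw [List.cons_append, List.foldl_cons]
      rw [step_mid (by simp at hlen ⊢; omega) (by omega)]
      rw [ih (R ++ [d]) P L ds hne' (by simp at hlen ⊢; omega) hP]
      simp

lemma consume_layer {w h : Int} (hw : 1 ≤ w) (hh : 1 ≤ h) :
    ∀ (rs : List (List Int)) (P : List (List Int)) (L : List (List (List Int))) (ds : List Int),
      rs ≠ [] → (∀ r ∈ rs, (r.length : Int) = w) → (P.length : Int) + rs.length = h →
      (rs.flatten ++ ds).foldl (stepA w h) (L, P, []) = ds.foldl (stepA w h) (L ++ [P ++ rs], [], []) := by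
  intro rs
  induction rs with
  | nil => intro _ _ _ hne; exact absurd rfl hne
  | cons r rs ih =>
    intro P L ds _ hlens hP
    have hr : (r.length : Int) = w := hlens r (List.mem_cons_self ..)
    have hrne : r ≠ [] := by intro hr0; rw [hr0] at hr; simp at hr; omega
    rcases rs with _ | ⟨r', rs'⟩
    · simp only [List.flatten_cons, List.flatten_nil, List.append_nil]
      rw [consume_row_last hw hh r [] P L ds hrne (by simpa using hr) (by simp at hP; omega)]
      simp
    · simp only [List.flatten_cons, List.append_assoc]
      rw [consume_row hw hh r [] P L _ hrne (by simpa using hr) (by simp at hP; omega)]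
      simp only [List.nil_append]
      rw [show r' ++ (rs'.flatten ++ ds) = (r' :: rs').flatten ++ ds by simp]
      rw [ih (P ++ [r]) L ds (by simp) (fun x hx => hlens x (List.mem_cons_of_mem _ hx))
        (by simp at hP ⊢; omega)]
      simp

lemma incomplete {w h : Int} (hw : 1 ≤ w) (hh : 1 ≤ h) :
    ∀ (ds : List Int) (P : List (List Int)) (R : List Int) (L : List (List (List Int))),
      (P.length : Int) < h → (R.length : Int) < w →
      ((P.length : Int) * w + R.length + ds.length < w * h) →
      (ds.foldl (stepA w h) (L, P, R)).1 = L := by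
  intro ds
  induction ds with
  | nil => intro P R L _ _ _; rfl
  | cons d ds ih =>
    intro P R L hP hR htot
    have hPw : ((P.length : Int) + 1) * w = (P.length : Int) * w + w := by ring
    by_cases hrow : (R.length : Int) + 1 = w
    · have hP1 : (P.length : Int) + 1 < h := by
        have h1 : ((P.length : Int) + 1) * w < w * h := by
          rw [hPw]; simp at htot; omega
        nlinarith
      rw [List.foldl_cons, step_row hrow (by omega)]
      apply ih (P ++ [R ++ [d]]) [] L (by simpa using hP1) (by simpa using hw)
      simp
      rw [hPw]
      simp at htot; omega
    · rw [List.foldl_cons, step_mid hrow (by omega)]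
      apply ih P (R ++ [d]) L hP (by simp; omega)
      simp at htot ⊢; push_cast at *; omega


lemma foldl_stepA_eq_chunks {w h : Int} (hw : 1 ≤ w) (hh : 1 ≤ h) :
    ∀ (ds : List Int) (L : List (List (List Int))),
      (ds.foldl (stepA w h) (L, [], [])).1 =
        L ++ (chunks (w.toNat * h.toNat) ds).map (chunks w.toNat) := by
  have hwW : ((w.toNat : Int)) = w := Int.toNat_of_nonneg (by omega)
  have hhH : ((h.toNat : Int)) = h := Int.toNat_of_nonneg (by omega)
  set W := w.toNat with hWdef
  set H := h.toNat with hHdef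
  have hW0 : 0 < W := by omega
  have hH0 : 0 < H := by omega
  have hM0 : 0 < W * H := Nat.mul_pos hW0 hH0
  intro ds
  induction hn : ds.length using Nat.strong_induction_on generalizing ds with
  | _ n ih =>
  intro L
  by_cases hge : W * H ≤ ds.length
  · -- a full layer is consumed
    have htake : (ds.take (W * H)).length = W * H := by simp; omega
    set rs := chunks W (ds.take (W * H)) with hrs
    have hflat : rs.flatten = ds.take (W * H) :=
      flatten_chunks hW0 H (ds.take (W * H)) (by omega)
    have hrslen : rs.length = H := length_chunks hW0 H (ds.take (W * H)) (by omega)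
    have hrsne : rs ≠ [] := by intro h0; rw [h0] at hrslen; simp at hrslen; omega
    have hmem : ∀ r ∈ rs, (r.length : Int) = w := by
      intro r hrmem
      rw [mem_chunks_length hW0 H (ds.take (W * H)) (by omega) r hrmem, hwW]
    have hsplit : ds = rs.flatten ++ ds.drop (W * H) := by
      rw [hflat]; exact (List.take_append_drop _ ds).symm
    conv_lhs => rw [hsplit]
    rw [consume_layer hw hh rs [] L (ds.drop (W * H)) hrsne hmem
      (by simp only [List.length_nil, Nat.cast_zero, zero_add, hrslen]; exact hhH)]
    rw [ih (ds.drop (W * H)).length (by simp; omega) (ds.drop (W * H)) rfl]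
    rw [chunks_cons (by omega) hge]
    simp
    exact hrs
  · -- no full layer fits: A appends nothing, chunks is empty
    rw [chunks_nil (by omega)]
    simp only [List.map_nil, List.append_nil]
    apply incomplete hw hh ds [] [] L (by simpa using hh) (by simpa using hw)
    simp
    calc (ds.length : Int) < ((W * H : Nat) : Int) := by push_cast; omega
    _ = w * h := by push_cast [hwW, hhH]; ring

lemma inner_rows {w h : Int} (hw : 1 ≤ w) (hh : 1 ≤ h) (chunk : List Int)
    (hlen : chunk.length = w.toNat * h.toNat) :
    (PySem.List.pyRange 0 (w * h) w).map
        (fun j => PySem.List.slice chunk (some j) (some (j + w))) =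
      chunks w.toNat chunk := by
  have hwW : ((w.toNat : Int)) = w := Int.toNat_of_nonneg (by omega)
  have hhH : ((h.toNat : Int)) = h := Int.toNat_of_nonneg (by omega)
  set W := w.toNat
  set H := h.toNat
  rw [PySem.List.pyRange_of_pos 0 (w*h) (by omega)]
  have hcnt : (if (0:Int) < w*h then (((w*h) - 0 + w - 1) / w).toNat else 0) = H := by
    rw [if_pos (by nlinarith)]
    have : (w*h) - 0 + w - 1 = (w - 1) + h * w := by ring
    rw [this, Int.add_mul_ediv_right _ _ (by omega : w ≠ 0),
      Int.ediv_eq_zero_of_lt (by omega) (by omega)]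
    simp
    rfl
  rw [hcnt, List.map_map, chunks_eq_map_range (by omega : 0 < W) chunk, hlen,
    Nat.mul_div_cancel_left H (by omega : 0 < W)]
  apply List.map_congr_left
  intro k _
  simp only [Function.comp]
  have hcast : 0 + w * (k : Int) = ((W * k : Nat) : Int) := by push_cast [hwW]; ring
  have hcast2 : 0 + w * (k : Int) + w = ((W * k : Nat) : Int) + ((W : Nat) : Int) := by
    push_cast [hwW]; ring
  rw [hcast2, hcast, PySem.List.slice_natCast_add chunk (W*k) W, Nat.mul_comm W k]

lemma parse_image_alt_eq_chunks (image : String) {dims : Int × Int}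
    (hw : 1 ≤ dims.1) (hh : 1 ≤ dims.2) :
    parse_image_alt image dims =
      (chunks (dims.1.toNat * dims.2.toNat) (image.toList.map pvInt)).map (chunks dims.1.toNat) := by
  obtain ⟨w, h⟩ := dims
  simp only at hw hh
  have hwW : ((w.toNat : Int)) = w := Int.toNat_of_nonneg (by omega)
  have hhH : ((h.toNat : Int)) = h := Int.toNat_of_nonneg (by omega)
  set W := w.toNat
  set H := h.toNat
  have hW0 : 0 < W := by omega
  have hM0 : 0 < W * H := Nat.mul_pos hW0 (by omega)
  simp only [parse_image_alt]
  set ds := image.toList.map pvInt with hds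
  set n := ds.length with hn
  rw [PySem.List.foldl_append_singleton_eq_map]
  rw [PySem.List.pyRange_of_pos 0 ((n:Int) - w*h + 1) (by nlinarith)]
  have hls : w * h = ((W * H : Nat) : Int) := by push_cast [hwW, hhH]; ring
  have hcnt : (if (0:Int) < (n:Int) - w*h + 1 then
      ((((n:Int) - w*h + 1) - 0 + w*h - 1) / (w*h)).toNat else 0) = n / (W*H) := by
    by_cases hc : W * H ≤ n
    · rw [if_pos (by rw [hls]; omega)]
      have : ((n:Int) - w*h + 1) - 0 + w*h - 1 = (n:Int) := by ring
      rw [this, hls]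
      norm_cast
    · rw [if_neg (by rw [hls]; omega), Nat.div_eq_of_lt (by omega)]
  rw [hcnt, List.map_map, chunks_eq_map_range hM0 ds, ← hn]
  simp only [List.nil_append, List.map_map]
  apply List.map_congr_left
  intro k hk
  have hk' : k < n / (W*H) := List.mem_range.mp hk
  have hkle : (k+1) * (W*H) ≤ n := (Nat.le_div_iff_mul_le hM0).mp hk'
  simp only [Function.comp]
  have hcast : 0 + w * h * (k : Int) = (((W*H) * k : Nat) : Int) := by push_cast [hwW, hhH]; ring
  have hcast2 : 0 + w * h * (k : Int) + w * h = (((W*H) * k : Nat) : Int) + ((W*H : Nat) : Int) := by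
    push_cast [hwW, hhH]; ring
  rw [hcast2, hcast, PySem.List.slice_natCast_add ds ((W*H)*k) (W*H)]
  have hchunklen : ((ds.drop ((W*H)*k)).take (W*H)).length = W * H := by
    have hkle' : (W*H)*k + W*H ≤ ds.length := by
      rw [Nat.add_mul, Nat.one_mul, Nat.mul_comm k (W*H)] at hkle
      omega
    simp
    omega
  rw [inner_rows hw hh _ hchunklen, Nat.mul_comm (W*H) k]

-- a negative width: no row ever completes, so A's accumulator never flushes
lemma foldl_stepA_wneg {w h : Int} (hw : w < 0) (hh : 1 ≤ h) :
    ∀ (ds R : List Int) (L : List (List (List Int))),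
      (ds.foldl (stepA w h) (L, [], R)).1 = L := by
  intro ds
  induction ds with
  | nil => intro R L; rfl
  | cons d ds ih =>
    intro R L
    rw [List.foldl_cons, step_mid (by omega) (by simp; omega)]
    exact ih (R ++ [d]) L

-- a negative height: no layer ever flushes into the output
lemma foldl_stepA_hneg {w h : Int} (hh : h < 0) :
    ∀ (ds : List Int) (P : List (List Int)) (R : List Int) (L : List (List (List Int))),
      (ds.foldl (stepA w h) (L, P, R)).1 = L := by
  intro ds
  induction ds with
  | nil => intro P R L; rfl
  | cons d ds ih =>
    intro P R L
    by_cases hrow : (R.length : Int) + 1 = w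
    · rw [List.foldl_cons, step_row hrow (by omega)]
      exact ih _ _ L
    · rw [List.foldl_cons, step_mid hrow (by omega)]
      exact ih _ _ L

-- a negative layer size: B's outer range is empty
lemma parse_image_alt_neg (image : String) {dims : Int × Int}
    (hls : dims.1 * dims.2 < 0) : parse_image_alt image dims = [] := by
  have h0 : ¬ (dims.1 * dims.2 = 0) := by omega
  have h1 : ¬ ((0:Int) < dims.1 * dims.2) := by omega
  have h2 : ¬ ((image.length : Int) - dims.1 * dims.2 + 1 < 0) := by
    have := Int.natCast_nonneg image.length
    omega
  simp [parse_image_alt, PySem.List.pyRange, h0, h1, h2]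

-- ===== VERDICT (by name: the statement is the Claim_ definition above) =====
theorem parse_image_spec : Claim_equal_parse_image := by
  intro image dims _hD hPre
  obtain ⟨hw0, hh0, hpos, _⟩ := hPre
  unfold Spec_parse_image
  rcases lt_or_gt_of_ne hw0 with hw | hw <;> rcases lt_or_gt_of_ne hh0 with hh | hh
  · exact absurd hpos (by omega)
  · rw [parse_image_eq_foldl, foldl_stepA_wneg hw (by omega) _ [] [],
      parse_image_alt_neg image (mul_neg_of_neg_of_pos hw hh)]
  · rw [parse_image_eq_foldl, foldl_stepA_hneg hh _ [] [] [],
      parse_image_alt_neg image (mul_neg_of_pos_of_neg hw hh)]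
  · rw [parse_image_eq_foldl, foldl_stepA_eq_chunks (by omega) (by omega),
      parse_image_alt_eq_chunks image (by omega) (by omega)]
    simp
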